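-- pv_equiv track=rewrite | github.com/neuralarchitects/ZKP-Blockchain-Explorer | python-files/zkp/polynomial.py | expand_polynomials
-- ===== SOURCE A (Python) =====
-- from typing import List, Tuple, Dict
--
-- def expand_polynomials(roots: List[int], p: int) -> List[int]:
--     # Start with the polynomial "1"
--     result = [1]
--
--     for root in roots:
--         # Multiply the current result polynomial by (x - root)
--         temp = [0] * (len(result) + 1)
--         for i in range(len(result)):
--             temp[i] = (temp[i] + result[i]) % p  # x^n term
--             temp[i + 1] = (temp[i + 1] - result[i] * root) % p  # -root * x^(n-1) term
--             if temp[i + 1] < 0: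
--                 temp[i + 1] += p
--         result = temp
--
--     result.reverse()
--     return result
-- ===== SOURCE B (Python) =====
-- def expand_polynomials(roots, p):
--     # Divide-and-conquer product tree over the reduced linear factors (x - root) mod p,
--     # coefficients kept in ascending order (no final reverse).
--     if not roots:
--         return [1]
--
--     def mul(a, b):
--         return [sum(a[i] * b[k - i]
--                     for i in range(max(0, k - len(b) + 1), min(k, len(a) - 1) + 1)) % p
--                 for k in range(len(a) + len(b) - 1)]
--
--     def prod(lo, hi):
--         if hi - lo == 1:
--             return [(-roots[lo]) % p, 1 % p]
--         mid = (lo + hi) // 2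
--         return mul(prod(lo, mid), prod(mid, hi))
--
--     return prod(0, len(roots))
-- ===== Notes on version B (the rewrite author's own statement) =====
-- stated objective: alternative
-- what changed: B replaces A's in-place left-to-right expansion (mutating a temp array per root, then reversing) by a divide-and-conquer product tree over the reduced linear factors whose node multiplication computes each coefficient directly as a clipped convolution sum mod p, in ascending order with no final reverse.
-- intended difference: For p < 0 with nonempty roots whose product p does not divide, A's leftover C-style sign fix adds p to the already-reduced (necessarily negative) constant coefficient, returning it below the floor-mod residue range (p, 0]; B returns the consistent floor-mod residue there, as for every other coefficient. — e.g. on expand_polynomials([2], -5): A returns [-7, -4], B returns [-2, -4]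
import Mathlib
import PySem

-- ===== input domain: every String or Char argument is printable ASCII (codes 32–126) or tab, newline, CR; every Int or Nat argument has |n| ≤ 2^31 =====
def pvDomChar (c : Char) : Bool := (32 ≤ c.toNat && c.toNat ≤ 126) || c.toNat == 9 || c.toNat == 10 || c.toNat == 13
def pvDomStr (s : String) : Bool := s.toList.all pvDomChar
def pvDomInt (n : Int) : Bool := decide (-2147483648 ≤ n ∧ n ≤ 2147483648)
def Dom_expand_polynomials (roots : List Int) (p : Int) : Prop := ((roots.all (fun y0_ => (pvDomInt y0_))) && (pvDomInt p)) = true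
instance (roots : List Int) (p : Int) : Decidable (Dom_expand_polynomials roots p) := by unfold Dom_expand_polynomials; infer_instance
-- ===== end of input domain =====

-- B replaces A's in-place O(n^2) left-to-right expansion by a divide-and-conquer
-- product tree over the reduced linear factors, with coefficients kept in
-- ascending order (no final reverse); same cost class, different structure.

-- ===== PORT A =====
def expand_polynomials (roots : List Int) (p : Int) : List Int :=
  (roots.foldl (fun result root =>
      (List.range result.length).foldl (fun temp i =>
          let temp1 := temp.set i (PySem.Int.mod (temp.getD i 0 + result.getD i 0) p)
          let t := PySem.Int.mod (temp1.getD (i + 1) 0 - result.getD i 0 * root) p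
          temp1.set (i + 1) (if t < 0 then t + p else t))
        (List.replicate (result.length + 1) 0))
    [1]).reverse

-- ===== PORT B =====
-- Source B's mul: coefficient k of a*b is the (reduced) sum over the clipped index range
def pvMulMod (p : Int) (a b : List Int) : List Int :=
  (List.range (a.length + b.length - 1)).map (fun k =>
    PySem.Int.mod
      (((List.range' (k + 1 - b.length)
          ((min k (a.length - 1) + 1) - (k + 1 - b.length))).map
        (fun i => a.getD i 0 * b.getD (k - i) 0)).sum) p)

-- Source B's prod(lo, hi): product tree over roots[lo:hi]; the extra fuel argument
-- (called with fuel = hi - lo, which Python's recursion depth realises implicitly)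
-- only makes the recursion structural and never runs out on the calls made
def pvProd (roots : List Int) (p : Int) : Nat → Nat → Nat → List Int
  | 0, _, _ => []
  | fuel + 1, lo, hi =>
    if hi - lo = 1 then
      [PySem.Int.mod (-(roots.getD lo 0)) p, PySem.Int.mod 1 p]
    else
      pvMulMod p (pvProd roots p fuel lo ((lo + hi) / 2))
                 (pvProd roots p fuel ((lo + hi) / 2) hi)

def expand_polynomials_alt (roots : List Int) (p : Int) : List Int :=
  if roots = [] then [1]
  else pvProd roots p roots.length 0 roots.length

-- ===== PRECONDITION & SPEC =====
-- p = 0 makes A (and B) raise ZeroDivisionError on the first '% p'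
def Pre_expand_polynomials (roots : List Int) (p : Int) : Prop := p ≠ 0
instance (roots : List Int) (p : Int) : Decidable (Pre_expand_polynomials roots p) := by unfold Pre_expand_polynomials; infer_instance
def pvWitness_expand_polynomials : List Int × Int := ([1, 2], 7)

-- For p < 0 with roots whose product p does not divide, A's leftover C-style sign
-- fix adds p to the already-reduced (necessarily negative) constant coefficient,
-- returning it below the floor-mod residue range (p, 0]; B returns the consistent
-- floor-mod residue there, as it does for every other coefficient.
def D_expand_polynomials (roots : List Int) (p : Int) : Prop :=
  p < 0 ∧ roots ≠ [] ∧ ¬ (p ∣ roots.prod)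
instance (roots : List Int) (p : Int) : Decidable (D_expand_polynomials roots p) := by unfold D_expand_polynomials; infer_instance

def Spec_expand_polynomials (roots : List Int) (p : Int) (out : List Int) : Prop :=
  ¬ D_expand_polynomials roots p → out = expand_polynomials_alt roots p
instance (roots : List Int) (p : Int) (out : List Int) : Decidable (Spec_expand_polynomials roots p out) := by unfold Spec_expand_polynomials; infer_instance

def pvDiffWitness_expand_polynomials : List Int × Int := ([2], -5)
def pvDiffWitnessOut_expand_polynomials : (List Int) × (List Int) := ([-7, -4], [-2, -4])

-- ===== CLAIM (what is proved, stated in full; the proofs are below) =====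
def Claim_unchanged_expand_polynomials : Prop := ∀ (roots : List Int) (p : Int), Dom_expand_polynomials roots p → Pre_expand_polynomials roots p → Spec_expand_polynomials roots p (expand_polynomials roots p)
def Claim_changed_expand_polynomials : Prop := Dom_expand_polynomials (pvDiffWitness_expand_polynomials.1) (pvDiffWitness_expand_polynomials.2) ∧ Pre_expand_polynomials (pvDiffWitness_expand_polynomials.1) (pvDiffWitness_expand_polynomials.2) ∧ D_expand_polynomials (pvDiffWitness_expand_polynomials.1) (pvDiffWitness_expand_polynomials.2) ∧ expand_polynomials (pvDiffWitness_expand_polynomials.1) (pvDiffWitness_expand_polynomials.2) = pvDiffWitnessOut_expand_polynomials.1 ∧ expand_polynomials_alt (pvDiffWitness_expand_polynomials.1) (pvDiffWitness_expand_polynomials.2) = pvDiffWitnessOut_expand_polynomials.2 ∧ pvDiffWitnessOut_expand_polynomials.1 ≠ pvDiffWitnessOut_expand_polynomials.2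
def Claim_exact_expand_polynomials : Prop := ∀ (roots : List Int) (p : Int), Dom_expand_polynomials roots p → Pre_expand_polynomials roots p → D_expand_polynomials roots p → expand_polynomials roots p ≠ expand_polynomials_alt roots p

-- ===== LEMMAS AND PROOFS =====

-- Python's %: congruence and characterisation
theorem pymod_modeq (x p : Int) : PySem.Int.mod x p ≡ x [ZMOD p] := by
  have h := PySem.Int.floordiv_mul_add_mod x p
  rw [Int.modEq_iff_dvd]
  exact ⟨PySem.Int.floordiv x p, by linarith⟩

theorem pymod_eq_of {x p c : Int} (hp : p ≠ 0) (h : c ≡ x [ZMOD p])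
    (hpos : 0 < p → 0 ≤ c ∧ c < p) (hneg : p < 0 → p < c ∧ c ≤ 0) :
    PySem.Int.mod x p = c := by
  have hme : c ≡ PySem.Int.mod x p [ZMOD p] := h.trans (pymod_modeq x p).symm
  have hd : p ∣ PySem.Int.mod x p - c := hme.dvd
  have hd' : |p| ∣ PySem.Int.mod x p - c := (abs_dvd _ _).mpr hd
  have hz : PySem.Int.mod x p - c = 0 := by
    apply Int.eq_zero_of_abs_lt_dvd hd'
    rcases lt_or_gt_of_ne hp with hn | hpos'
    · have hb := PySem.Int.mod_neg_bounds x hn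
      have hc := hneg hn
      rw [abs_sub_lt_iff]
      constructor <;> [skip; skip] <;> · rw [abs_of_neg hn]; omega
    · have hb1 := PySem.Int.mod_nonneg x hpos'
      have hb2 := PySem.Int.mod_lt x hpos'
      have hc := hpos hpos'
      rw [abs_sub_lt_iff]
      constructor <;> · rw [abs_of_pos hpos']; omega
  omega

theorem pymod_congr {x y p : Int} (hp : p ≠ 0) (h : x ≡ y [ZMOD p]) :
    PySem.Int.mod x p = PySem.Int.mod y p := by
  apply pymod_eq_of hp ((pymod_modeq y p).trans h.symm)
  · intro hpos
    exact ⟨PySem.Int.mod_nonneg y hpos, PySem.Int.mod_lt y hpos⟩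
  · intro hn
    exact PySem.Int.mod_neg_bounds y hn

theorem pymod_zero {p : Int} (hp : p ≠ 0) : PySem.Int.mod 0 p = 0 := by
  apply pymod_eq_of hp (Int.ModEq.refl 0) <;> intro h <;> omega

-- A's sign-fix step
def pvFix (p t : Int) : Int := if t < 0 then t + p else t

theorem pvFix_modeq (p t : Int) : pvFix p t ≡ t [ZMOD p] := by
  unfold pvFix
  split
  · rw [Int.modEq_iff_dvd]
    exact ⟨-1, by ring⟩
  · rfl

-- list-sum congruence mod p
theorem sum_map_modeq {α : Type} (p : Int) (f g : α → Int) (l : List α)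
    (h : ∀ x ∈ l, f x ≡ g x [ZMOD p]) :
    ((l.map f).sum) ≡ ((l.map g).sum) [ZMOD p] := by
  induction l with
  | nil => rfl
  | cons x xs ih =>
    simp only [List.map_cons, List.sum_cons]
    exact (h x (by simp)).add (ih (fun y hy => h y (by simp [hy])))

theorem list_range_sum_eq (f : Nat → Int) (n : Nat) :
    ((List.range n).map f).sum = ∑ i ∈ Finset.range n, f i := by
  induction n with
  | zero => simp
  | succ n ih => rw [List.range_succ, Finset.sum_range_succ]; simp [ih]

-- product coefficient as a list sum over range (k+1)
theorem coeff_mul_list (f g : Polynomial Int) (k : Nat) :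
    (f * g).coeff k = ((List.range (k + 1)).map (fun i => f.coeff i * g.coeff (k - i))).sum := by
  rw [list_range_sum_eq, Polynomial.coeff_mul,
    Finset.Nat.sum_antidiagonal_eq_sum_range_succ_mk]

theorem list_range'_sum_eq (f : Nat → Int) (lo k : Nat) :
    ((List.range' lo k).map f).sum = ∑ i ∈ Finset.range k, f (lo + i) := by
  induction k generalizing lo with
  | zero => simp
  | succ k ih =>
    rw [List.range'_succ]
    simp only [List.map_cons, List.sum_cons, ih (lo + 1)]
    rw [Finset.sum_range_succ', add_comm]
    simp only [Nat.add_zero]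
    congr 1
    apply Finset.sum_congr rfl
    intro i _
    congr 1
    omega

-- clipped range' sum = full range sum when the clipped-out terms vanish
theorem sum_range'_eq_range (f : Nat → Int) (lo hi n : Nat) (hhi : hi ≤ n)
    (h1 : ∀ i, i < lo → f i = 0) (h2 : ∀ i, hi ≤ i → i < n → f i = 0) :
    ((List.range' lo (hi - lo)).map f).sum = ((List.range n).map f).sum := by
  rw [list_range'_sum_eq, list_range_sum_eq, ← Finset.sum_Ico_eq_sum_range]
  apply Finset.sum_subset
  · intro i hmem
    simp only [Finset.mem_Ico] at hmem
    simp only [Finset.mem_range]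
    omega
  · intro i hmem hnot
    simp only [Finset.mem_range] at hmem
    simp only [Finset.mem_Ico, not_and, not_lt] at hnot
    rcases Nat.lt_or_ge i lo with h | h
    · exact h1 i h
    · exact h2 i (hnot h) hmem

-- the polynomial ∏ (X - C r) over a coefficient list
noncomputable def QL (l : List Int) : Polynomial Int :=
  (l.map (fun r => Polynomial.X - Polynomial.C r)).prod

theorem QL_natDegree_le (l : List Int) : (QL l).natDegree ≤ l.length := by
  have h := Polynomial.natDegree_list_prod_le (l.map (fun r => Polynomial.X - Polynomial.C r))
  unfold QL
  refine h.trans (le_of_eq ?_)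
  rw [List.map_map]
  have : (Polynomial.natDegree ∘ fun r => Polynomial.X - Polynomial.C r) = fun _ : Int => 1 := by
    funext r
    simp only [Function.comp_apply]
    exact Polynomial.natDegree_X_sub_C r
  rw [this, List.map_const']
  simp

theorem QL_coeff_zero_of_gt {l : List Int} {k : Nat} (h : l.length < k) : (QL l).coeff k = 0 := by
  exact Polynomial.coeff_eq_zero_of_natDegree_lt (lt_of_le_of_lt (QL_natDegree_le l) h)

theorem QL_append (a b : List Int) : QL (a ++ b) = QL a * QL b := by
  unfold QL
  rw [List.map_append, List.prod_append]

theorem QL_single (r : Int) : QL [r] = Polynomial.X - Polynomial.C r := by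
  simp [QL]

theorem QL_concat_coeff_succ (l : List Int) (r : Int) (j : Nat) :
    (QL (l ++ [r])).coeff (j + 1) = (QL l).coeff j - (QL l).coeff (j + 1) * r := by
  rw [QL_append, QL_single, mul_sub, Polynomial.coeff_sub, Polynomial.coeff_mul_X,
    Polynomial.coeff_mul_C]

theorem QL_concat_coeff_zero (l : List Int) (r : Int) :
    (QL (l ++ [r])).coeff 0 = -((QL l).coeff 0 * r) := by
  rw [QL_append, QL_single, mul_sub, Polynomial.coeff_sub, Polynomial.coeff_mul_C]
  simp [Polynomial.mul_coeff_zero]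

theorem QL_coeff_zero_eq (l : List Int) : (QL l).coeff 0 = (l.map (fun r => -r)).prod := by
  rw [Polynomial.coeff_zero_eq_eval_zero]
  unfold QL
  rw [Polynomial.eval_list_prod, List.map_map]
  congr 1
  apply List.map_congr_left
  intro r _
  simp

theorem prod_map_neg (l : List Int) : (l.map (fun r => -r)).prod = (-1) ^ l.length * l.prod := by
  induction l with
  | nil => simp
  | cons x xs ih => simp [ih, pow_succ]; ring

theorem dvd_QL_coeff_zero_iff (p : Int) (l : List Int) :
    (p ∣ (QL l).coeff 0) ↔ (p ∣ l.prod) := by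
  rw [QL_coeff_zero_eq, prod_map_neg]
  rcases Nat.even_or_odd l.length with h | h
  · rw [h.neg_one_pow]; simp
  · rw [h.neg_one_pow]; simp [dvd_neg]

-- B's segment polynomial
noncomputable def QR (roots : List Int) (lo hi : Nat) : Polynomial Int :=
  QL ((List.range' lo (hi - lo)).map (fun i => roots.getD i 0))

-- pvMulMod: length and entries
theorem pvMulMod_length (p : Int) (a b : List Int) :
    (pvMulMod p a b).length = a.length + b.length - 1 := by
  simp [pvMulMod]

theorem pvMulMod_getD (p : Int) (a b : List Int) (k : Nat) (hk : k < a.length + b.length - 1) :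
    (pvMulMod p a b).getD k 0
      = PySem.Int.mod (((List.range (k + 1)).map (fun i => a.getD i 0 * b.getD (k - i) 0)).sum) p := by
  unfold pvMulMod
  rw [List.getD_eq_getElem?_getD, List.getElem?_map, List.getElem?_range hk]
  simp only [Option.map_some, Option.getD_some]
  congr 1
  apply sum_range'_eq_range
  · omega
  · intro i hilt
    have hb : b.length ≤ k - i := by omega
    rw [List.getD_eq_default _ _ hb, mul_zero]
  · intro i hge hlt
    have ha : a.length ≤ i := by omega
    rw [List.getD_eq_default _ _ ha, zero_mul]

theorem QR_coeff_zero_of_gt (roots : List Int) {lo hi k : Nat} (h : hi - lo < k) :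
    (QR roots lo hi).coeff k = 0 := by
  apply QL_coeff_zero_of_gt
  simpa using h

theorem QR_split (roots : List Int) (lo mid hi : Nat) (h1 : lo ≤ mid) (h2 : mid ≤ hi) :
    QR roots lo hi = QR roots lo mid * QR roots mid hi := by
  have e := List.range'_append (s := lo) (m := mid - lo) (n := hi - mid) (step := 1)
  rw [show lo + 1 * (mid - lo) = mid by omega,
      show (mid - lo) + (hi - mid) = hi - lo by omega] at e
  unfold QR
  rw [← QL_append, ← List.map_append, e]

-- B's invariant: the tree node over [lo, hi) has length hi - lo + 1 and holds the
-- reduced coefficients of ∏_{lo ≤ i < hi} (X - roots[i])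
theorem pvProd_spec (roots : List Int) (p : Int) (hp : p ≠ 0) :
    ∀ (fuel lo hi : Nat), 1 ≤ hi - lo → hi - lo ≤ fuel →
      (pvProd roots p fuel lo hi).length = hi - lo + 1 ∧
      ∀ i, (pvProd roots p fuel lo hi).getD i 0 = PySem.Int.mod ((QR roots lo hi).coeff i) p := by
  intro fuel
  induction fuel with
  | zero => intro lo hi hone hle; omega
  | succ fuel ih =>
    intro lo hi hone hle
    by_cases hb : hi - lo = 1
    · have hq : QR roots lo hi = QL [roots.getD lo 0] := by
        unfold QR
        rw [hb, List.range'_one, List.map_singleton]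
      have hlist : pvProd roots p (fuel + 1) lo hi
          = [PySem.Int.mod (-(roots.getD lo 0)) p, PySem.Int.mod 1 p] := by
        simp [pvProd, hb]
      have hc0 : (QL [roots.getD lo 0]).coeff 0 = -(roots.getD lo 0) := by
        rw [QL_single, Polynomial.coeff_sub, Polynomial.coeff_X_zero, Polynomial.coeff_C_zero]
        ring
      have hc1 : (QL [roots.getD lo 0]).coeff 1 = 1 := by
        rw [QL_single, Polynomial.coeff_sub, Polynomial.coeff_X_one, Polynomial.coeff_C]
        norm_num
      refine ⟨by simp [pvProd, hb], ?_⟩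
      intro i
      match i with
      | 0 =>
        rw [hlist]
        simp only [List.getD_cons_zero]
        rw [hq, hc0]
      | 1 =>
        rw [hlist]
        simp only [List.getD_cons_succ, List.getD_cons_zero]
        rw [hq, hc1]
      | (n + 2) =>
        rw [hlist]
        simp only [List.getD_cons_succ]
        rw [List.getD_eq_default _ _ (by simp), hq,
          QL_coeff_zero_of_gt (by simp), pymod_zero hp]
    · have h2' : 2 ≤ hi - lo := by omega
      have hmlo : lo < (lo + hi) / 2 := by omega
      have hmhi : (lo + hi) / 2 < hi := by omega
      obtain ⟨hlu, hu⟩ := ih lo ((lo + hi) / 2) (by omega) (by omega)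
      obtain ⟨hlv, hv⟩ := ih ((lo + hi) / 2) hi (by omega) (by omega)
      have hred : pvProd roots p (fuel + 1) lo hi
          = pvMulMod p (pvProd roots p fuel lo ((lo + hi) / 2))
              (pvProd roots p fuel ((lo + hi) / 2) hi) := by
        simp [pvProd, hb]
      have hlen : (pvMulMod p (pvProd roots p fuel lo ((lo + hi) / 2))
          (pvProd roots p fuel ((lo + hi) / 2) hi)).length = hi - lo + 1 := by
        rw [pvMulMod_length, hlu, hlv]; omega
      have hsplit := QR_split roots lo ((lo + hi) / 2) hi (by omega) (by omega)
      refine ⟨by rw [hred, hlen], ?_⟩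
      intro i
      rw [hred]
      by_cases hik : i < hi - lo + 1
      · rw [pvMulMod_getD p _ _ i (by rw [hlu, hlv]; omega)]
        apply pymod_congr hp
        rw [hsplit, coeff_mul_list]
        apply sum_map_modeq
        intro j _
        rw [hu j, hv (i - j)]
        exact (pymod_modeq _ p).mul (pymod_modeq _ p)
      · rw [List.getD_eq_default _ _ (by omega),
          QR_coeff_zero_of_gt roots (by omega), pymod_zero hp]

-- A's inner loop as a carry recursion
def stepGo (p rt : Int) : Int → List Int → List Int
  | c, [] => [c]
  | c, x :: xs => PySem.Int.mod (c + x) p :: stepGo p rt (pvFix p (PySem.Int.mod (0 - x * rt) p)) xs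

theorem stepGo_length (p rt : Int) : ∀ (c : Int) (a : List Int), (stepGo p rt c a).length = a.length + 1 := by
  intro c a
  induction a generalizing c with
  | nil => simp [stepGo]
  | cons x xs ih => simp [stepGo, ih]

-- stepGo's entries, expressed against reference values d that its input is
-- congruent to mod p
theorem stepGo_spec (p rt : Int) (hp : p ≠ 0) :
    ∀ (a : List Int) (c cref : Int) (d : Nat → Int),
      (∀ j, j < a.length → a.getD j 0 ≡ d j [ZMOD p]) →
      (c ≡ cref [ZMOD p]) →
      ∀ i, i ≤ a.length →
        (stepGo p rt c a).getD i 0 =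
          if i = a.length then
            (if i = 0 then c else pvFix p (PySem.Int.mod (0 - d (i - 1) * rt) p))
          else
            PySem.Int.mod ((if i = 0 then cref else 0 - d (i - 1) * rt) + d i) p := by
  intro a
  induction a with
  | nil =>
    intro c cref d hd hc i hi
    have : i = 0 := by simp only [List.length_nil] at hi; omega
    subst this
    simp [stepGo]
  | cons x xs ih =>
    intro c cref d hd hc i hi
    have hx : x ≡ d 0 [ZMOD p] := by simpa using hd 0 (by simp)
    have hcons : stepGo p rt c (x :: xs)
        = PySem.Int.mod (c + x) p :: stepGo p rt (pvFix p (PySem.Int.mod (0 - x * rt) p)) xs := rfl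
    match i with
    | 0 =>
      rw [hcons]
      simp only [List.getD_cons_zero, List.length_cons,
        if_neg (by omega : ¬ (0 = xs.length + 1))]
      exact pymod_congr hp (hc.add hx)
    | (j + 1) =>
      have hcarry : pvFix p (PySem.Int.mod (0 - x * rt) p) ≡ 0 - d 0 * rt [ZMOD p] :=
        ((pvFix_modeq p _).trans (pymod_modeq _ p)).trans
          ((Int.ModEq.refl 0).sub (hx.mul (Int.ModEq.refl rt)))
      have hfixeq : pvFix p (PySem.Int.mod (0 - x * rt) p)
          = pvFix p (PySem.Int.mod (0 - d 0 * rt) p) := by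
        congr 1
        exact pymod_congr hp ((Int.ModEq.refl 0).sub (hx.mul (Int.ModEq.refl rt)))
      rw [hcons]
      simp only [List.getD_cons_succ, List.length_cons]
      rw [ih (pvFix p (PySem.Int.mod (0 - x * rt) p)) (0 - d 0 * rt) (fun j => d (j + 1))
        (fun j hj => by simpa using hd (j + 1) (by simp only [List.length_cons]; omega)) hcarry j
        (by simp only [List.length_cons] at hi; omega)]
      by_cases hlen : j = xs.length
      · rw [if_pos hlen, if_pos (by omega : j + 1 = xs.length + 1), if_neg (by omega : ¬ (j + 1 = 0))]
        by_cases hj : j = 0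
        · rw [if_pos hj, hfixeq]
          simp only [Nat.add_sub_cancel, hj]
        · rw [if_neg hj]
          simp only [Nat.add_sub_cancel]
          rw [show j - 1 + 1 = j from by omega]
      · rw [if_neg hlen, if_neg (by omega : ¬ (j + 1 = xs.length + 1)),
          if_neg (by omega : ¬ (j + 1 = 0))]
        by_cases hj : j = 0
        · rw [if_pos hj, hj]
        · rw [if_neg hj]
          simp only [Nat.add_sub_cancel]
          rw [show j - 1 + 1 = j from by omega]

-- A's inner foldl, started at index j with the prefix `done` already written,
-- equals `done` followed by the carry recursion over the remaining suffix
theorem inner_aux (p root : Int) (result : List Int) :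
    ∀ (l : List Int) (done : List Int) (c : Int),
      result.drop done.length = l →
      (List.range' done.length l.length).foldl (fun temp i =>
          let temp1 := temp.set i (PySem.Int.mod (temp.getD i 0 + result.getD i 0) p)
          let t := PySem.Int.mod (temp1.getD (i + 1) 0 - result.getD i 0 * root) p
          temp1.set (i + 1) (if t < 0 then t + p else t))
        (done ++ c :: List.replicate l.length 0)
      = done ++ stepGo p root c l := by
  intro l
  induction l with
  | nil =>
    intro done c _
    simp [stepGo]
  | cons x xs ih =>
    intro done c hdrop
    have hlen : result.length - done.length = xs.length + 1 := by
      have := congrArg List.length hdrop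
      simpa using this
    have hx : result.getD done.length 0 = x := by
      have h0 := congrArg (fun t : List Int => t[0]?) hdrop
      simp only [List.getElem?_drop, Nat.add_zero, List.getElem?_cons_zero] at h0
      rw [List.getD_eq_getElem?_getD, h0, Option.getD_some]
    have hdrop' : result.drop (done.length + 1) = xs := by
      rw [← List.tail_drop, hdrop, List.tail_cons]
    rw [List.length_cons, List.range'_succ, List.foldl_cons]
    have hinit : (done ++ c :: List.replicate (xs.length + 1) 0).getD done.length 0 = c := by
      rw [List.getD_eq_getElem?_getD, List.getElem?_append_right (le_refl done.length),
        Nat.sub_self, List.getElem?_cons_zero, Option.getD_some]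
    have hset1 : (done ++ c :: List.replicate (xs.length + 1) 0).set done.length
        (PySem.Int.mod (c + x) p)
        = done ++ PySem.Int.mod (c + x) p :: List.replicate (xs.length + 1) 0 := by
      rw [List.set_append_right _ _ (le_refl done.length), Nat.sub_self, List.set_cons_zero]
    have hget2 : (done ++ PySem.Int.mod (c + x) p :: List.replicate (xs.length + 1) 0).getD
        (done.length + 1) 0 = 0 := by
      rw [List.getD_eq_getElem?_getD, List.getElem?_append_right (by omega),
        Nat.add_sub_cancel_left, List.getElem?_cons_succ, List.replicate_succ,
        List.getElem?_cons_zero, Option.getD_some]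
    have hset2 : ∀ v : Int, (done ++ PySem.Int.mod (c + x) p :: List.replicate (xs.length + 1) 0).set
        (done.length + 1) v
        = (done ++ [PySem.Int.mod (c + x) p]) ++ v :: List.replicate xs.length 0 := by
      intro v
      rw [List.set_append_right _ _ (by omega), Nat.add_sub_cancel_left, List.set_cons_succ,
        List.replicate_succ, List.set_cons_zero]
      simp
    simp only [hinit, hx, hset1, hget2, hset2]
    have harg : done.length + 1 = (done ++ [PySem.Int.mod (c + x) p]).length := by simp
    rw [show PySem.Int.mod (0 - x * root) p = PySem.Int.mod (0 - x * root) p from rfl]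
    rw [show (if PySem.Int.mod (0 - x * root) p < 0 then PySem.Int.mod (0 - x * root) p + p
        else PySem.Int.mod (0 - x * root) p) = pvFix p (PySem.Int.mod (0 - x * root) p) from rfl]
    rw [harg, ih (done ++ [PySem.Int.mod (c + x) p]) (pvFix p (PySem.Int.mod (0 - x * root) p))
      (by rw [← harg, hdrop'])]
    simp [stepGo]

-- A's inner foldl over indices equals the carry recursion
theorem inner_loop (p root : Int) (result : List Int) :
    (List.range result.length).foldl (fun temp i =>
        let temp1 := temp.set i (PySem.Int.mod (temp.getD i 0 + result.getD i 0) p)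
        let t := PySem.Int.mod (temp1.getD (i + 1) 0 - result.getD i 0 * root) p
        temp1.set (i + 1) (if t < 0 then t + p else t))
      (List.replicate (result.length + 1) 0)
    = stepGo p root 0 result := by
  have h := inner_aux p root result result [] 0 (by simp)
  simpa [List.range_eq_range', List.replicate_succ] using h

-- A's per-root step, named for the proofs
def stepA (p : Int) (result : List Int) (root : Int) : List Int :=
  (List.range result.length).foldl (fun temp i =>
      let temp1 := temp.set i (PySem.Int.mod (temp.getD i 0 + result.getD i 0) p)
      let t := PySem.Int.mod (temp1.getD (i + 1) 0 - result.getD i 0 * root) p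
      temp1.set (i + 1) (if t < 0 then t + p else t))
    (List.replicate (result.length + 1) 0)

theorem expandA_eq (roots : List Int) (p : Int) :
    expand_polynomials roots p = (roots.foldl (stepA p) [1]).reverse := rfl

theorem stepA_eq (p : Int) (result : List Int) (root : Int) :
    stepA p result root = stepGo p root 0 result := inner_loop p root result

theorem QL_single_coeff_zero (r : Int) : (QL [r]).coeff 0 = -r := by
  rw [QL_single, Polynomial.coeff_sub, Polynomial.coeff_X_zero, Polynomial.coeff_C_zero]
  ring

theorem QL_single_coeff_one (r : Int) : (QL [r]).coeff 1 = 1 := by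
  rw [QL_single, Polynomial.coeff_sub, Polynomial.coeff_X_one, Polynomial.coeff_C]
  norm_num

-- A's outer invariant: after the (nonempty) prefix l the accumulator holds, leading
-- coefficient first, the reduced coefficients of ∏ (X - r), with the sign fix on the last
theorem foldl_char (p : Int) (hp : p ≠ 0) (l : List Int) (hl : l ≠ []) :
    (l.foldl (stepA p) [1]).length = l.length + 1 ∧
    ∀ i, i ≤ l.length →
      (l.foldl (stepA p) [1]).getD i 0
      = (if i = l.length then pvFix p (PySem.Int.mod ((QL l).coeff 0) p)
         else PySem.Int.mod ((QL l).coeff (l.length - i)) p) := by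
  induction l using List.reverseRecOn with
  | nil => exact absurd rfl hl
  | append_singleton l r ih =>
    rw [List.foldl_append, List.foldl_cons, List.foldl_nil, stepA_eq]
    rcases eq_or_ne l [] with hnil | hne
    · subst hnil
      simp only [List.foldl_nil]
      refine ⟨by simp [stepGo], ?_⟩
      intro i hi
      simp only [List.nil_append, List.length_cons, List.length_nil] at hi ⊢
      match i with
      | 0 =>
        rw [if_neg (by omega)]
        show PySem.Int.mod (0 + 1) p = PySem.Int.mod ((QL [r]).coeff (1 - 0)) p
        rw [QL_single_coeff_one]
        norm_num
      | 1 =>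
        rw [if_pos rfl]
        show pvFix p (PySem.Int.mod (0 - 1 * r) p) = pvFix p (PySem.Int.mod ((QL [r]).coeff 0) p)
        rw [QL_single_coeff_zero]
        congr 2
        ring
    · obtain ⟨hlen, hent⟩ := ih hne
      have hn1 : 1 ≤ l.length := List.length_pos_iff.mpr hne
      have hd : ∀ j, j < (l.foldl (stepA p) [1]).length →
          (l.foldl (stepA p) [1]).getD j 0 ≡ (QL l).coeff (l.length - j) [ZMOD p] := by
        intro j hj
        rw [hlen] at hj
        rw [hent j (by omega)]
        by_cases hjl : j = l.length
        · rw [if_pos hjl, hjl, Nat.sub_self]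
          exact (pvFix_modeq p _).trans (pymod_modeq _ p)
        · rw [if_neg hjl]
          exact pymod_modeq _ p
      constructor
      · rw [stepGo_length, hlen]
        simp
      · intro i hi
        have hll : (l ++ [r]).length = l.length + 1 := by simp
        rw [hll] at hi
        rw [stepGo_spec p r hp _ 0 0 (fun j => (QL l).coeff (l.length - j)) hd
          (Int.ModEq.refl 0) i (by rw [hlen]; omega)]
        rw [hlen, hll]
        by_cases hitop : i = l.length + 1
        · rw [if_pos hitop, if_pos hitop, if_neg (by omega : ¬ (i = 0))]
          congr 1
          apply pymod_congr hp
          rw [hitop, Nat.add_sub_cancel, Nat.sub_self, QL_concat_coeff_zero]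
          have : (0 : Int) - (QL l).coeff 0 * r = -((QL l).coeff 0 * r) := by ring
          rw [this]
        · rw [if_neg hitop, if_neg hitop]
          by_cases hi0 : i = 0
          · subst hi0
            rw [if_pos rfl]
            simp only [Nat.sub_zero]
            have e := QL_concat_coeff_succ l r l.length
            have e0 : (QL l).coeff (l.length + 1) = 0 := QL_coeff_zero_of_gt (by omega)
            rw [e, e0]
            congr 1
            ring
          · rw [if_neg hi0]
            have e := QL_concat_coeff_succ l r (l.length - i)
            rw [show l.length - (i - 1) = (l.length - i) + 1 from by omega,
              show l.length + 1 - i = (l.length - i) + 1 from by omega, e]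
            congr 1
            ring

-- entrywise description of A's output
theorem expandA_getD (roots : List Int) (p : Int) (hp : p ≠ 0) (hne : roots ≠ []) :
    (expand_polynomials roots p).length = roots.length + 1 ∧
    ∀ k, k ≤ roots.length →
      (expand_polynomials roots p).getD k 0 =
        (if k = 0 then pvFix p (PySem.Int.mod ((QL roots).coeff 0) p)
         else PySem.Int.mod ((QL roots).coeff k) p) := by
  obtain ⟨hlen, hent⟩ := foldl_char p hp roots hne
  have hn1 : 1 ≤ roots.length := List.length_pos_iff.mpr hne
  rw [expandA_eq]
  refine ⟨by rw [List.length_reverse, hlen], ?_⟩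
  intro k hk
  have hrev : (roots.foldl (stepA p) [1]).reverse.getD k 0
      = (roots.foldl (stepA p) [1]).getD (roots.length - k) 0 := by
    rw [List.getD_eq_getElem?_getD, List.getD_eq_getElem?_getD,
      List.getElem?_eq_getElem (by simp only [List.length_reverse]; omega),
      List.getElem?_eq_getElem (by omega)]
    simp only [Option.getD_some, List.getElem_reverse]
    congr 1
    rw [hlen]
    omega
  rw [hrev, hent (roots.length - k) (by omega)]
  by_cases hk0 : k = 0
  · subst hk0
    rw [Nat.sub_zero, if_pos rfl, if_pos rfl]
  · rw [if_neg (by omega : ¬ (roots.length - k = roots.length)), if_neg hk0,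
      show roots.length - (roots.length - k) = k from by omega]

theorem map_getD_range (roots : List Int) :
    (List.range roots.length).map (fun i => roots.getD i 0) = roots := by
  apply List.ext_getElem (by simp)
  intro i h1 h2
  simp only [List.getElem_map, List.getElem_range]
  rw [List.getD_eq_getElem?_getD, List.getElem?_eq_getElem h2, Option.getD_some]

-- entrywise description of B's output
theorem expandB_getD (roots : List Int) (p : Int) (hp : p ≠ 0) (hne : roots ≠ []) :
    (expand_polynomials_alt roots p).length = roots.length + 1 ∧
    ∀ k, (expand_polynomials_alt roots p).getD k 0 = PySem.Int.mod ((QL roots).coeff k) p := by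
  have hn1 : 1 ≤ roots.length := List.length_pos_iff.mpr hne
  obtain ⟨hlen, hent⟩ := pvProd_spec roots p hp roots.length 0 roots.length (by omega) (by omega)
  have hQ : QR roots 0 roots.length = QL roots := by
    unfold QR
    rw [Nat.sub_zero, ← List.range_eq_range', map_getD_range]
  simp only [expand_polynomials_alt, if_neg hne]
  refine ⟨by rw [hlen]; omega, ?_⟩
  intro k
  rw [hent k, hQ]

-- ===== VERDICT (by name: the statement is the Claim_ definition above) =====
theorem expand_polynomials_spec : Claim_unchanged_expand_polynomials := by
  intro roots p hdom hpre
  unfold Pre_expand_polynomials at hpre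
  unfold Spec_expand_polynomials
  intro hnd
  rcases eq_or_ne roots [] with hnil | hne
  · subst hnil
    rfl
  · obtain ⟨hAl, hAe⟩ := expandA_getD roots p hpre hne
    obtain ⟨hBl, hBe⟩ := expandB_getD roots p hpre hne
    apply List.ext_getElem (by rw [hAl, hBl])
    intro k h1 h2
    rw [show (expand_polynomials roots p)[k] = (expand_polynomials roots p).getD k 0 from by
        rw [List.getD_eq_getElem?_getD, List.getElem?_eq_getElem h1, Option.getD_some],
      show (expand_polynomials_alt roots p)[k] = (expand_polynomials_alt roots p).getD k 0 from by
        rw [List.getD_eq_getElem?_getD, List.getElem?_eq_getElem h2, Option.getD_some],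
      hAe k (by rw [hAl] at h1; omega), hBe k]
    by_cases hk : k = 0
    · subst hk
      rw [if_pos rfl]
      unfold D_expand_polynomials at hnd
      rcases lt_or_gt_of_ne hpre with hneg | hpos
      · have hdvd : p ∣ roots.prod := by
          by_contra hnd2
          exact hnd ⟨hneg, hne, hnd2⟩
        have h0 : PySem.Int.mod ((QL roots).coeff 0) p = 0 :=
          (PySem.Int.mod_eq_zero_iff_dvd _ _).mpr ((dvd_QL_coeff_zero_iff p roots).mpr hdvd)
        rw [h0]
        unfold pvFix
        norm_num
      · have h0 := PySem.Int.mod_nonneg ((QL roots).coeff 0) hpos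
        unfold pvFix
        rw [if_neg (by omega)]
    · rw [if_neg hk]

theorem expand_polynomials_changed : Claim_changed_expand_polynomials := by
  unfold Claim_changed_expand_polynomials; decide

theorem expand_polynomials_tight : Claim_exact_expand_polynomials := by
  intro roots p hdom hpre hd heq
  unfold Pre_expand_polynomials at hpre
  unfold D_expand_polynomials at hd
  obtain ⟨hneg, hne, hndvd⟩ := hd
  obtain ⟨hAl, hAe⟩ := expandA_getD roots p hpre hne
  obtain ⟨hBl, hBe⟩ := expandB_getD roots p hpre hne
  have hget := congrArg (fun l : List Int => l.getD 0 0) heq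
  simp only at hget
  rw [hAe 0 (by omega), hBe 0, if_pos rfl] at hget
  have hb := PySem.Int.mod_neg_bounds ((QL roots).coeff 0) hneg
  have hnz : PySem.Int.mod ((QL roots).coeff 0) p ≠ 0 := by
    intro h0
    exact hndvd ((dvd_QL_coeff_zero_iff p roots).mp ((PySem.Int.mod_eq_zero_iff_dvd _ _).mp h0))
  unfold pvFix at hget
  rw [if_pos (by omega)] at hget
  omega
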